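-- pv_equiv track=rewrite | github.com/Empreiteiro/langflow-factory | components/crm/others/pipedream.py | update_build_config
-- ===== SOURCE A (Python) =====
-- def update_build_config(build_config, field_value, field_name=None):
--     if field_name != "action":
--         return build_config
--
--     # Extract action name from the selected action
--     selected = [action["name"] for action in field_value] if isinstance(field_value, list) else []
--
--     field_map = {
--         "Generate OAuth Token": [],
--         "Create Connect Token": ["external_user_id"],
--         "List Apps": [],
--         "Retrieve App": ["app_id"],
--         "List App Categories": [],
--         "List Accounts": ["external_user_id"],
--         "Retrieve Account": ["account_id"],
--         "Delete Account": ["account_id"],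
--         "Delete Accounts by App": ["app_id", "external_user_id"],
--         "List Components": ["app_id"],
--         "Retrieve Component": ["component_id"],
--         "List Actions": ["app_id"],
--         "Retrieve Action": ["action_id"],
--         "Run Action": ["action_id", "action_props"],
--         "List Triggers": ["app_id"],
--         "Retrieve Trigger": ["trigger_id"],
--         "Deploy Trigger": ["trigger_id", "trigger_props"],
--         "List Deployed Triggers": ["external_user_id"],
--         "Get Deployed Trigger": ["deployed_trigger_id"],
--         "Update Deployed Trigger": ["deployed_trigger_id", "update_data"],
--         "Delete Deployed Trigger": ["deployed_trigger_id"],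
--     }
--
--     # Hide all dynamic fields first
--     for field_name in ["external_user_id", "app_id", "account_id", "component_id", "action_id",
--                       "trigger_id", "deployed_trigger_id", "action_props", "trigger_props", "update_data"]:
--         if field_name in build_config:
--             build_config[field_name]["show"] = False
--
--     # Show fields based on selected action
--     if len(selected) == 1 and selected[0] in field_map:
--         for field_name in field_map[selected[0]]:
--             if field_name in build_config:
--                 build_config[field_name]["show"] = True
--
--     return build_config
-- ===== SOURCE B (Python) =====
-- DYNAMIC_FIELDS = ["external_user_id", "app_id", "account_id", "component_id", "action_id",
--                   "trigger_id", "deployed_trigger_id", "action_props", "trigger_props", "update_data"]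
--
-- FIELD_MAP = {
--     "Generate OAuth Token": [],
--     "Create Connect Token": ["external_user_id"],
--     "List Apps": [],
--     "Retrieve App": ["app_id"],
--     "List App Categories": [],
--     "List Accounts": ["external_user_id"],
--     "Retrieve Account": ["account_id"],
--     "Delete Account": ["account_id"],
--     "Delete Accounts by App": ["app_id", "external_user_id"],
--     "List Components": ["app_id"],
--     "Retrieve Component": ["component_id"],
--     "List Actions": ["app_id"],
--     "Retrieve Action": ["action_id"],
--     "Run Action": ["action_id", "action_props"],
--     "List Triggers": ["app_id"],
--     "Retrieve Trigger": ["trigger_id"],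
--     "Deploy Trigger": ["trigger_id", "trigger_props"],
--     "List Deployed Triggers": ["external_user_id"],
--     "Get Deployed Trigger": ["deployed_trigger_id"],
--     "Update Deployed Trigger": ["deployed_trigger_id", "update_data"],
--     "Delete Deployed Trigger": ["deployed_trigger_id"],
-- }
--
--
-- def update_build_config(build_config, field_value, field_name=None):
--     if field_name != "action":
--         return build_config
--
--     selected = [action["name"] for action in field_value] if isinstance(field_value, list) else []
--
--     # The set of fields that should be visible for the selected action.
--     if len(selected) == 1 and selected[0] in FIELD_MAP:
--         show = set(FIELD_MAP[selected[0]])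
--     else:
--         show = set()
--
--     # One pass over build_config: every dynamic field gets its visibility directly.
--     for key, cfg in build_config.items():
--         if key in DYNAMIC_FIELDS:
--             cfg["show"] = key in show
--
--     return build_config
-- ===== Notes on version B (the rewrite author's own statement) =====
-- stated objective: simpler
-- what changed: Instead of A's hide-all loop over the ten field names followed by a second show loop over the selected action's fields, B precomputes the set of fields to show and makes one pass over build_config itself, assigning each dynamic field's show flag as a single membership test.
import Mathlib
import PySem

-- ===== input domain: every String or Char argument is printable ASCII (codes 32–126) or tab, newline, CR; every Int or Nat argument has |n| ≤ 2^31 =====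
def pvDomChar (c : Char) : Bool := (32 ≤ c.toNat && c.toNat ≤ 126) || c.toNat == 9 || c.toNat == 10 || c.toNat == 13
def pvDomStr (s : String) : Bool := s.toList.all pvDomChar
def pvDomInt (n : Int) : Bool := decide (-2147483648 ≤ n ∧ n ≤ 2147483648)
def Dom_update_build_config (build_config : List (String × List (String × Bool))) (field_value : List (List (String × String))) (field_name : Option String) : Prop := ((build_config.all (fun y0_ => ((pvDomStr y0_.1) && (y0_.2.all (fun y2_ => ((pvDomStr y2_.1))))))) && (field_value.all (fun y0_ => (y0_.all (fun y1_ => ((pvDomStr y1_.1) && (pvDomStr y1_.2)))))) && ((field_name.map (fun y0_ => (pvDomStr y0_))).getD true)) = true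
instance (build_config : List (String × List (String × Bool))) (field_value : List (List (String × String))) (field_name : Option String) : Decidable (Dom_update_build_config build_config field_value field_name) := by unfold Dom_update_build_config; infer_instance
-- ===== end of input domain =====

-- B replaces A's hide-all loop plus conditional show loop with one pass over build_config that
-- assigns each dynamic field's show flag from a precomputed show set (objective: simpler).
-- Python A and B both mutate build_config in place and return it; the equivalence proved here is about the return value.


-- the field_map / FIELD_MAP table, literal in both Python sources
def pvFieldMap : List (String × List String) := [
  ("Generate OAuth Token", []),
  ("Create Connect Token", ["external_user_id"]),
  ("List Apps", []),
  ("Retrieve App", ["app_id"]),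
  ("List App Categories", []),
  ("List Accounts", ["external_user_id"]),
  ("Retrieve Account", ["account_id"]),
  ("Delete Account", ["account_id"]),
  ("Delete Accounts by App", ["app_id", "external_user_id"]),
  ("List Components", ["app_id"]),
  ("Retrieve Component", ["component_id"]),
  ("List Actions", ["app_id"]),
  ("Retrieve Action", ["action_id"]),
  ("Run Action", ["action_id", "action_props"]),
  ("List Triggers", ["app_id"]),
  ("Retrieve Trigger", ["trigger_id"]),
  ("Deploy Trigger", ["trigger_id", "trigger_props"]),
  ("List Deployed Triggers", ["external_user_id"]),
  ("Get Deployed Trigger", ["deployed_trigger_id"]),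
  ("Update Deployed Trigger", ["deployed_trigger_id", "update_data"]),
  ("Delete Deployed Trigger", ["deployed_trigger_id"])]

-- the list of ten dynamic field names, literal in both Python sources
def pvDynamicFields : List String :=
  ["external_user_id", "app_id", "account_id", "component_id", "action_id",
   "trigger_id", "deployed_trigger_id", "action_props", "trigger_props", "update_data"]

-- inner-dict assignment d["show"] = b (overwrite first "show" entry in place, else append)
def pvSetShow (b : Bool) : List (String × Bool) → List (String × Bool)
  | [] => [("show", b)]
  | (k, v) :: t => if k = "show" then ("show", b) :: t else (k, v) :: pvSetShow b t

-- ===== PORT A =====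
-- build_config[n]["show"] = b on the first entry with key n
def pvModifyKey (n : String) (b : Bool) : List (String × List (String × Bool)) → List (String × List (String × Bool))
  | [] => []
  | (k, v) :: t => if k = n then (k, pvSetShow b v) :: t else (k, v) :: pvModifyKey n b t

-- one iteration of A's loops: 'if field_name in build_config: build_config[field_name]["show"] = b'
def pvSetField (b : Bool) (bc : List (String × List (String × Bool))) (n : String) : List (String × List (String × Bool)) :=
  if (bc.map Prod.fst).contains n then pvModifyKey n b bc else bc

def update_build_config (build_config : List (String × List (String × Bool))) (field_value : List (List (String × String))) (field_name : Option String) : List (String × List (String × Bool)) :=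
  if field_name ≠ some "action" then build_config
  else
    -- action["name"] raises KeyError when absent: those inputs are outside Pre_
    let selected := field_value.map (fun action => (List.lookup "name" action).getD "")
    -- hide all dynamic fields first
    let bc1 := pvDynamicFields.foldl (fun acc n => pvSetField false acc n) build_config
    -- show fields based on selected action
    if selected.length = 1 ∧ (List.lookup (selected.getD 0 "") pvFieldMap).isSome then
      ((List.lookup (selected.getD 0 "") pvFieldMap).getD []).foldl (fun acc n => pvSetField true acc n) bc1
    else bc1

-- ===== PORT B =====
def update_build_config_alt (build_config : List (String × List (String × Bool))) (field_value : List (List (String × String))) (field_name : Option String) : List (String × List (String × Bool)) :=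
  if field_name ≠ some "action" then build_config
  else
    let selected := field_value.map (fun action => (List.lookup "name" action).getD "")
    -- the set of fields that should be visible for the selected action
    let showSet : PySem.Set String :=
      if selected.length = 1 ∧ (List.lookup (selected.getD 0 "") pvFieldMap).isSome then
        PySem.Set.ofList ((List.lookup (selected.getD 0 "") pvFieldMap).getD [])
      else PySem.Set.empty
    -- one pass over build_config: every dynamic field gets its visibility directly
    build_config.map (fun kv =>
      if pvDynamicFields.contains kv.1 then (kv.1, pvSetShow (PySem.Set.contains showSet kv.1) kv.2) else kv)

-- ===== PRECONDITION & SPEC =====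
-- Pre_ requires build_config's keys to be distinct (it is a Python dict, so every input the Python
-- programs ever see satisfies this) and excludes the inputs where A raises KeyError (field_name ==
-- "action" while some entry of field_value lacks a "name" key).
def Pre_update_build_config (build_config : List (String × List (String × Bool))) (field_value : List (List (String × String))) (field_name : Option String) : Prop :=
  (build_config.map Prod.fst).Nodup ∧
  (field_name = some "action" → ∀ action ∈ field_value, (List.lookup "name" action).isSome)
instance (build_config : List (String × List (String × Bool))) (field_value : List (List (String × String))) (field_name : Option String) : Decidable (Pre_update_build_config build_config field_value field_name) := by unfold Pre_update_build_config; infer_instance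

def pvWitness_update_build_config : (List (String × List (String × Bool))) × (List (List (String × String))) × Option String :=
  ([("app_id", [("show", false)]), ("account_id", [("show", true)])], [[("name", "Retrieve App")]], some "action")

def Spec_update_build_config (build_config : List (String × List (String × Bool))) (field_value : List (List (String × String))) (field_name : Option String) (out : List (String × List (String × Bool))) : Prop := out = update_build_config_alt build_config field_value field_name
instance (build_config : List (String × List (String × Bool))) (field_value : List (List (String × String))) (field_name : Option String) (out : List (String × List (String × Bool))) : Decidable (Spec_update_build_config build_config field_value field_name out) := by unfold Spec_update_build_config; infer_instance

-- ===== CLAIM (what is proved, stated in full; the proofs are below) =====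
def Claim_equal_update_build_config : Prop := ∀ (build_config : List (String × List (String × Bool))) (field_value : List (List (String × String))) (field_name : Option String), Dom_update_build_config build_config field_value field_name → Pre_update_build_config build_config field_value field_name → Spec_update_build_config build_config field_value field_name (update_build_config build_config field_value field_name)

-- ===== LEMMAS AND PROOFS =====

-- per-entry effect of setting the show flag of every field whose name lies in L
def pvFlag (L : List String) (b : Bool) (kv : String × List (String × Bool)) : String × List (String × Bool) :=
  if kv.1 ∈ L then (kv.1, pvSetShow b kv.2) else kv

theorem pvFlag_fst (L : List String) (b : Bool) (kv : String × List (String × Bool)) :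
    (pvFlag L b kv).1 = kv.1 := by
  unfold pvFlag; split <;> rfl

theorem keys_map_pvFlag (L : List String) (b : Bool) (bc : List (String × List (String × Bool))) :
    (bc.map (pvFlag L b)).map Prod.fst = bc.map Prod.fst := by
  rw [List.map_map]
  exact List.map_congr_left (fun kv _ => pvFlag_fst L b kv)

theorem map_pvFlag_nil (b : Bool) (bc : List (String × List (String × Bool))) :
    bc.map (pvFlag [] b) = bc := by
  rw [show pvFlag [] b = id from funext fun kv => by simp [pvFlag], List.map_id]

theorem map_pvFlag_single_not_mem (n : String) (b : Bool) (bc : List (String × List (String × Bool)))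
    (h : n ∉ bc.map Prod.fst) : bc.map (pvFlag [n] b) = bc := by
  induction bc with
  | nil => rfl
  | cons kv t ih =>
    simp only [List.map_cons, List.mem_cons] at h
    push Not at h
    rw [List.map_cons, ih h.2]
    unfold pvFlag
    rw [if_neg (by simp; rintro rfl; exact h.1 rfl)]

theorem pvSetField_eq_map (n : String) (b : Bool) (bc : List (String × List (String × Bool)))
    (hnd : (bc.map Prod.fst).Nodup) : pvSetField b bc n = bc.map (pvFlag [n] b) := by
  unfold pvSetField
  by_cases hmem : n ∈ bc.map Prod.fst
  · rw [if_pos (by simpa using hmem)]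
    clear hmem
    induction bc with
    | nil => rfl
    | cons kv t ih =>
      cases kv with
      | mk k v =>
        simp only [List.map_cons, List.nodup_cons] at hnd
        by_cases hk : k = n
        · subst hk
          simp only [pvModifyKey, List.map_cons]
          rw [map_pvFlag_single_not_mem k b t hnd.1]
          simp [pvFlag]
        · simp only [pvModifyKey, if_neg hk, List.map_cons, ih hnd.2]
          unfold pvFlag
          rw [if_neg (by simp [hk])]
  · rw [if_neg (by simpa using hmem), map_pvFlag_single_not_mem n b bc hmem]

theorem pvFlag_cons (n : String) (L : List String) (b : Bool) (hn : n ∉ L)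
    (kv : String × List (String × Bool)) :
    pvFlag L b (pvFlag [n] b kv) = pvFlag (n :: L) b kv := by
  cases kv with
  | mk k v =>
    by_cases hk : k = n
    · subst hk
      simp [pvFlag, hn]
    · simp [pvFlag, hk]

theorem foldl_pvSetField_eq_map (L : List String) (b : Bool)
    (bc : List (String × List (String × Bool)))
    (hL : L.Nodup) (hnd : (bc.map Prod.fst).Nodup) :
    L.foldl (fun acc n => pvSetField b acc n) bc = bc.map (pvFlag L b) := by
  induction L generalizing bc with
  | nil => rw [List.foldl_nil, map_pvFlag_nil]
  | cons n L' ih =>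
    simp only [List.nodup_cons] at hL
    rw [List.foldl_cons, pvSetField_eq_map n b bc hnd,
        ih (bc.map (pvFlag [n] b)) hL.2 (by rw [keys_map_pvFlag]; exact hnd),
        List.map_map]
    exact List.map_congr_left (fun kv _ => pvFlag_cons n L' b hL.1 kv)

theorem pvSetShow_pvSetShow (b c : Bool) (v : List (String × Bool)) :
    pvSetShow b (pvSetShow c v) = pvSetShow b v := by
  induction v with
  | nil => simp [pvSetShow]
  | cons kv t ih =>
    cases kv with
    | mk k w =>
      by_cases hk : k = "show"
      · subst hk; simp [pvSetShow]
      · simp [pvSetShow, hk, ih]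

-- hide-then-show collapses to one membership-driven assignment, provided S ⊆ L
theorem pvFlag_comp (L S : List String) (hS : ∀ s ∈ S, s ∈ L)
    (kv : String × List (String × Bool)) :
    pvFlag S true (pvFlag L false kv) =
      if kv.1 ∈ L then (kv.1, pvSetShow (decide (kv.1 ∈ S)) kv.2) else kv := by
  cases kv with
  | mk k v =>
    by_cases hL : k ∈ L
    · by_cases hSk : k ∈ S
      · simp [pvFlag, hL, hSk, pvSetShow_pvSetShow]
      · simp [pvFlag, hL, hSk]
    · have hSk : k ∉ S := fun h => hL (hS k h)
      simp [pvFlag, hL, hSk]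

theorem pv_mem_of_lookup_eq_some {α β : Type} [BEq α] [LawfulBEq α] {k : α} {v : β}
    {l : List (α × β)} (h : List.lookup k l = some v) : (k, v) ∈ l := by
  induction l with
  | nil => simp [List.lookup] at h
  | cons p t ih =>
    cases p with
    | mk a b =>
      rw [List.lookup_cons] at h
      split at h
      · next heq =>
        have hk : k = a := eq_of_beq heq
        injection h with h
        subst hk; subst h
        exact List.mem_cons_self
      · exact List.mem_cons_of_mem _ (ih h)

-- every value of the field map is duplicate-free and a subset of the ten dynamic fields
theorem pvFieldMap_values_ok : ∀ p ∈ pvFieldMap, p.2.Nodup ∧ ∀ s ∈ p.2, s ∈ pvDynamicFields := by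
  decide

-- ===== VERDICT (by name: the statement is the Claim_ definition above) =====
theorem update_build_config_spec : Claim_equal_update_build_config := by
  intro bc fv fn _hdom hpre
  unfold Spec_update_build_config update_build_config update_build_config_alt
  by_cases hfn : fn = some "action"
  · subst hfn
    simp only [if_neg (show ¬(some "action" ≠ some "action") by simp)]
    by_cases hcond : (fv.map (fun action => (List.lookup "name" action).getD "")).length = 1 ∧
        (List.lookup ((fv.map (fun action => (List.lookup "name" action).getD "")).getD 0 "") pvFieldMap).isSome
    · obtain ⟨Sl, hSl⟩ := Option.isSome_iff_exists.mp hcond.2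
      simp only [if_pos hcond]
      simp only [hSl, Option.getD_some]
      have hok := pvFieldMap_values_ok _ (pv_mem_of_lookup_eq_some hSl)
      rw [foldl_pvSetField_eq_map pvDynamicFields false bc (by decide) hpre.1,
          foldl_pvSetField_eq_map Sl true _ hok.1 (by rw [keys_map_pvFlag]; exact hpre.1),
          List.map_map]
      refine List.map_congr_left (fun kv _ => ?_)
      rw [Function.comp_apply, pvFlag_comp pvDynamicFields Sl hok.2 kv]
      by_cases hd : kv.1 ∈ pvDynamicFields
      · simp [hd, PySem.Set.mem_ofList]
      · simp [hd]
    · simp only [if_neg hcond]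
      rw [foldl_pvSetField_eq_map pvDynamicFields false bc (by decide) hpre.1]
      refine List.map_congr_left (fun kv _ => ?_)
      unfold pvFlag
      by_cases hd : kv.1 ∈ pvDynamicFields
      · simp [hd, PySem.Set.empty]
      · simp [hd]
  · rw [if_pos (by simpa using hfn), if_pos (by simpa using hfn)]
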